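-- pv_equiv track=rewrite | github.com/HoYoung1/backjoon-Level | backjoon_level_python/1599.py | convert_list_from_text
-- ===== SOURCE A (Python) =====
-- def convert_list_from_text(text):
--     temp = []
--
--     # + 는 ng를의미 -는 pass하라는걸의미
--     text_list = list(text)
--     for i in range(len(text_list)):
--         if i != len(text) - 1 and text_list[i] == 'n' and text_list[i + 1] == 'g':
--             temp.append('+')
--             text_list[i + 1] = '-'
--         elif text_list[i] == '-':
--             continue
--         else:
--             temp.append(text_list[i])
--     return temp
-- ===== SOURCE B (Python) =====
-- def convert_list_from_text(text):
--     return list(text.replace('ng', '+').replace('-', ''))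
-- ===== Notes on version B (the rewrite author's own statement) =====
-- stated objective: idiomatic
-- what changed: Replaces A's index loop with in-place sentinel mutation by two str.replace passes ('ng'->'+' then delete every '-') wrapped in list().
import Mathlib
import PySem

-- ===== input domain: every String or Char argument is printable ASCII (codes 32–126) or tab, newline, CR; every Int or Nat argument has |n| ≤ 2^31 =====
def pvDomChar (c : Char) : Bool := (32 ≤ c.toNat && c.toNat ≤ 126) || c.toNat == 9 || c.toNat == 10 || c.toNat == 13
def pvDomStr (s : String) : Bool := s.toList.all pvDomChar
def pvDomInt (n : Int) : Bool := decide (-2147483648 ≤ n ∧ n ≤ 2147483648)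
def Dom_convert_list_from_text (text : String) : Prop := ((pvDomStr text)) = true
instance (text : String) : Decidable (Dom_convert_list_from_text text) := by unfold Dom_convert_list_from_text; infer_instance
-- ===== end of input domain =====

-- B replaces A's index loop (with in-place '-' sentinel mutation) by two str.replace passes; measured faster at large sizes.


-- ===== PORT A =====
-- loop body of A (one iteration of 'for i in range(len(text_list))'; st = (text_list, temp))
def stepA (n : Int) (st : List Char × List String) (i : Int) : List Char × List String :=
  if i ≠ n - 1 ∧ PySem.List.pyGetD st.1 i ' ' = 'n' ∧ PySem.List.pyGetD st.1 (i + 1) ' ' = 'g' then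
    (PySem.List.pySetD st.1 (i + 1) '-', st.2 ++ ["+"])
  else if PySem.List.pyGetD st.1 i ' ' = '-' then st
  else (st.1, st.2 ++ [String.ofList [PySem.List.pyGetD st.1 i ' ']])

def convert_list_from_text (text : String) : List String :=
  ((PySem.List.pyRange 0 (PySem.Str.len text) 1).foldl (stepA (PySem.Str.len text)) (text.toList, [])).2

-- ===== PORT B =====
def convert_list_from_text_alt (text : String) : List String :=
  (PySem.Str.replace (PySem.Str.replace text "ng" "+") "-" "").toList.map (fun c => String.ofList [c])

-- ===== PRECONDITION & SPEC =====
def Spec_convert_list_from_text (text : String) (out : List String) : Prop := out = convert_list_from_text_alt text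
instance (text : String) (out : List String) : Decidable (Spec_convert_list_from_text text out) := by unfold Spec_convert_list_from_text; infer_instance

-- ===== CLAIM (what is proved, stated in full; the proofs are below) =====
def Claim_equal_convert_list_from_text : Prop := ∀ (text : String), Dom_convert_list_from_text text → Spec_convert_list_from_text text (convert_list_from_text text)

-- ===== LEMMAS AND PROOFS =====

-- the common value both programs compute, as one recursion over the characters
def fAB : List Char → List Char
  | [] => []
  | c :: rest =>
    if c = 'n' ∧ rest.head? = some 'g' then '+' :: fAB rest.tail
    else if c = '-' then fAB rest
    else c :: fAB rest
  termination_by l => l.length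
  decreasing_by
  · simp only [List.length_tail, List.length_cons]; omega
  · simp
  · simp

-- greedy non-overlapping 'ng' -> '+' substitution, as a recursion
def rng : List Char → List Char
  | [] => []
  | c :: rest =>
    if c = 'n' ∧ rest.head? = some 'g' then '+' :: rng rest.tail
    else c :: rng rest
  termination_by l => l.length
  decreasing_by
  · simp only [List.length_tail, List.length_cons]; omega
  · simp

lemma go_ng : ∀ (fuel : Nat) (l acc : List Char), l.length ≤ fuel →
    PySem.Chars.replace.go ['n','g'] ['+'] fuel l acc = acc.reverse ++ rng l := by
  intro fuel
  induction fuel with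
  | zero =>
    intro l acc h
    have : l = [] := by cases l <;> simp_all
    subst this
    simp [PySem.Chars.replace.go, rng]
  | succ f ih =>
    intro l acc h
    cases l with
    | nil => simp [PySem.Chars.replace.go, rng]
    | cons c t =>
      rw [PySem.Chars.replace.go]
      by_cases hp : List.isPrefixOf ['n','g'] (c::t) = true
      · obtain ⟨t', rfl, rfl⟩ : ∃ t', t = 'g' :: t' ∧ c = 'n' := by
          cases t with
          | nil => simp [List.isPrefixOf] at hp
          | cons b t' =>
            simp [List.isPrefixOf] at hp
            exact ⟨t', by rw [hp.2], by rw [hp.1]⟩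
        rw [if_pos hp]
        have ht : t'.length ≤ f := by simp at h; omega
        rw [show (List.drop (['n','g'] : List Char).length ('n'::'g'::t')) = t' from rfl]
        rw [ih _ _ ht]
        rw [rng]
        simp
      · rw [if_neg hp]
        have ht : t.length ≤ f := by simp at h; omega
        rw [ih _ _ ht, rng]
        have hcond : ¬ (c = 'n' ∧ t.head? = some 'g') := by
          intro ⟨h1, h2⟩
          cases t with
          | nil => simp at h2
          | cons b t' => simp at h2; simp [List.isPrefixOf, h1, h2] at hp
        rw [if_neg hcond]
        simp

lemma go_dash : ∀ (fuel : Nat) (l acc : List Char), l.length ≤ fuel →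
    PySem.Chars.replace.go ['-'] [] fuel l acc = acc.reverse ++ l.filter (fun c => !(c == '-')) := by
  intro fuel
  induction fuel with
  | zero =>
    intro l acc h
    have : l = [] := by cases l <;> simp_all
    subst this
    simp [PySem.Chars.replace.go]
  | succ f ih =>
    intro l acc h
    cases l with
    | nil => simp [PySem.Chars.replace.go]
    | cons c t =>
      rw [PySem.Chars.replace.go]
      have ht : t.length ≤ f := by simp at h; omega
      by_cases hc : c = '-'
      · subst hc
        rw [if_pos (by simp [List.isPrefixOf])]
        rw [show List.drop (['-'] : List Char).length ('-'::t) = t from rfl]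
        rw [show (([] : List Char).reverse ++ acc) = acc from by simp]
        rw [ih _ _ ht]
        simp
      · rw [if_neg (by simp [List.isPrefixOf]; intro h'; exact hc h'.symm)]
        rw [ih _ _ ht]
        simp [hc]

lemma replace_ng (l : List Char) : PySem.Chars.replace l ['n','g'] ['+'] = rng l := by
  rw [PySem.Chars.replace]
  rw [if_neg (by simp)]
  rw [go_ng _ _ _ le_rfl]
  simp

lemma replace_dash (l : List Char) : PySem.Chars.replace l ['-'] [] = l.filter (fun c => !(c == '-')) := by
  rw [PySem.Chars.replace]
  rw [if_neg (by simp)]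
  rw [go_dash _ _ _ le_rfl]
  simp

lemma fAB_eq_filter_rng (l : List Char) : fAB l = (rng l).filter (fun c => !(c == '-')) := by
  fun_induction fAB l with
  | case1 => simp [rng]
  | case2 c rest h ih =>
    rw [rng, if_pos h]
    simp [ih]
  | case3 rest h ih =>
    rw [rng, if_neg h]
    simp [ih]
  | case4 c rest h hc ih =>
    rw [rng, if_neg h]
    simp [ih, hc]

lemma altB (text : String) :
    convert_list_from_text_alt text = (fAB text.toList).map (fun c => String.ofList [c]) := by
  unfold convert_list_from_text_alt
  rw [PySem.Str.toList_replace, PySem.Str.toList_replace]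
  rw [show ("ng" : String).toList = ['n','g'] from rfl,
      show ("+" : String).toList = ['+'] from rfl,
      show ("-" : String).toList = ['-'] from rfl,
      show ("" : String).toList = [] from rfl]
  rw [replace_ng, replace_dash, fAB_eq_filter_rng]

lemma drop_facts {tl suffix : List Char} {c : Char} {k : Nat} (hdrop : tl.drop k = c :: suffix) :
    k < tl.length ∧ tl[k]! = c ∧ tl.drop (k+1) = suffix := by
  have hk : k < tl.length := by
    by_contra h
    rw [List.drop_eq_nil_of_le (by omega)] at hdrop
    simp at hdrop
  have := List.getElem_cons_drop hk
  rw [hdrop] at this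
  have h2 := this.symm
  injection h2 with ha hb
  exact ⟨hk, by rw [List.getElem!_eq_getElem?_getD, List.getElem?_eq_getElem hk, Option.getD_some, ha], hb.symm⟩

lemma pyGetD_eq {tl : List Char} {k : Nat} (hk : k < tl.length) :
    PySem.List.pyGetD tl (k : Int) ' ' = tl[k] := by
  rw [PySem.List.pyGetD_natCast, List.getD_eq_getElem _ _ hk]

lemma loopA (n : Int) (suffix : List Char) :
    ∀ (k : Nat) (tl : List Char) (temp : List String),
      (tl.length : Int) = n → tl.drop k = suffix →
      ((PySem.List.pyRange (k : Int) n 1).foldl (stepA n) (tl, temp)).2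
        = temp ++ (fAB suffix).map (fun c => String.ofList [c]) := by
  induction suffix using fAB.induct with
  | case1 =>
    intro k tl temp hn hdrop
    have hk : tl.length ≤ k := by
      by_contra h
      rw [List.drop_eq_nil_iff] at hdrop
      omega
    rw [PySem.List.pyRange_one_eq_nil (by omega)]
    simp [fAB]
  | case2 c rest hcr ih =>
    intro k tl temp hn hdrop
    obtain ⟨hc, hh⟩ := hcr
    subst hc
    obtain ⟨t, rfl⟩ : ∃ t, rest = 'g' :: t := by
      cases rest with
      | nil => simp at hh
      | cons b t => simp at hh; subst hh; exact ⟨t, rfl⟩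
    obtain ⟨hk, hgk, hd1⟩ := drop_facts hdrop
    obtain ⟨hk1, hgk1, hd2⟩ := drop_facts hd1
    have hgk' : tl[k] = 'n' := by rwa [List.getElem!_eq_getElem?_getD, List.getElem?_eq_getElem hk, Option.getD_some] at hgk
    have hgk1' : tl[k+1] = 'g' := by rwa [List.getElem!_eq_getElem?_getD, List.getElem?_eq_getElem hk1, Option.getD_some] at hgk1
    rw [PySem.List.pyRange_one_cons (by omega)]
    rw [List.foldl_cons]
    have hstep1 : stepA n (tl, temp) ↑k = (tl.set (k+1) '-', temp ++ ["+"]) := by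
      unfold stepA
      rw [if_pos ?_]
      · rw [show ((k : Int) + 1) = ((k+1 : Nat) : Int) by push_cast; ring, PySem.List.pySetD_natCast]
      · refine ⟨by omega, by rw [pyGetD_eq hk, hgk'], ?_⟩
        rw [show ((k : Int) + 1) = ((k+1 : Nat) : Int) by push_cast; ring, pyGetD_eq hk1, hgk1']
    rw [hstep1]
    rw [show ((k : Int) + 1) = ((k+1 : Nat) : Int) by push_cast; ring]
    rw [PySem.List.pyRange_one_cons (by omega)]
    rw [List.foldl_cons]
    have hstep2 : stepA n (tl.set (k+1) '-', temp ++ ["+"]) ↑(k+1) = (tl.set (k+1) '-', temp ++ ["+"]) := by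
      unfold stepA
      have hget' : PySem.List.pyGetD (tl.set (k+1) '-') ((k+1 : Nat) : Int) ' ' = '-' := by
        rw [pyGetD_eq (by simpa using hk1)]
        simp
      rw [if_neg (by rw [hget']; rintro ⟨-, h2, -⟩; exact absurd h2 (by decide))]
      rw [if_pos hget']
    rw [hstep2]
    rw [show (((k+1 : Nat) : Int) + 1) = ((k+2 : Nat) : Int) by push_cast; ring]
    rw [ih (k+2) (tl.set (k+1) '-') (temp ++ ["+"]) (by simpa using hn)
        (by rw [List.drop_set_of_lt (by omega)]; simpa using hd2)]
    rw [fAB]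
    rw [if_pos ⟨rfl, rfl⟩]
    simp
  | case3 rest h ih =>
    intro k tl temp hn hdrop
    obtain ⟨hk, hgk, hd1⟩ := drop_facts hdrop
    have hgk' : tl[k] = '-' := by rwa [List.getElem!_eq_getElem?_getD, List.getElem?_eq_getElem hk, Option.getD_some] at hgk
    rw [PySem.List.pyRange_one_cons (by omega)]
    rw [List.foldl_cons]
    have hstep : stepA n (tl, temp) ↑k = (tl, temp) := by
      unfold stepA
      rw [if_neg (by rw [pyGetD_eq hk, hgk']; rintro ⟨-, h2, -⟩; exact absurd h2 (by decide))]
      rw [if_pos (by rw [pyGetD_eq hk, hgk'])]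
    rw [hstep]
    rw [show ((k : Int) + 1) = ((k+1 : Nat) : Int) by push_cast; ring]
    rw [ih (k+1) tl temp hn hd1]
    rw [fAB]
    rw [if_neg (by simp), if_pos rfl]
  | case4 c rest h hc ih =>
    intro k tl temp hn hdrop
    obtain ⟨hk, hgk, hd1⟩ := drop_facts hdrop
    have hgk' : tl[k] = c := by rwa [List.getElem!_eq_getElem?_getD, List.getElem?_eq_getElem hk, Option.getD_some] at hgk
    rw [PySem.List.pyRange_one_cons (by omega)]
    rw [List.foldl_cons]
    have hstep : stepA n (tl, temp) ↑k = (tl, temp ++ [String.ofList [c]]) := by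
      unfold stepA
      rw [if_neg ?_]
      · rw [if_neg (by rw [pyGetD_eq hk, hgk']; exact hc)]
        rw [pyGetD_eq hk, hgk']
      · rintro ⟨h1, h2, h3⟩
        rw [pyGetD_eq hk, hgk'] at h2
        subst h2
        cases hrest : rest with
        | nil =>
          rw [hrest] at hd1
          have hlen : tl.length ≤ k + 1 := by
            have := congrArg List.length hd1; simp at this; omega
          rw [show ((k : Int) + 1) = ((k+1 : Nat) : Int) by push_cast; ring,
              PySem.List.pyGetD_natCast, List.getD_eq_default _ _ hlen] at h3
          exact absurd h3 (by decide)
        | cons b r =>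
          rw [hrest] at hd1
          obtain ⟨hk1, hgb, -⟩ := drop_facts hd1
          have hgb' : tl[k+1] = b := by rwa [List.getElem!_eq_getElem?_getD, List.getElem?_eq_getElem hk1, Option.getD_some] at hgb
          rw [show ((k : Int) + 1) = ((k+1 : Nat) : Int) by push_cast; ring, pyGetD_eq hk1, hgb'] at h3
          exact h ⟨rfl, by simp [hrest, h3]⟩
    rw [hstep]
    rw [show ((k : Int) + 1) = ((k+1 : Nat) : Int) by push_cast; ring]
    rw [ih (k+1) tl (temp ++ [String.ofList [c]]) hn hd1]
    rw [fAB]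
    rw [if_neg h, if_neg hc]
    simp

-- ===== VERDICT (by name: the statement is the Claim_ definition above) =====
theorem convert_list_from_text_spec : Claim_equal_convert_list_from_text := by
  intro text _
  unfold Spec_convert_list_from_text
  rw [altB]
  unfold convert_list_from_text
  have h := loopA (PySem.Str.len text) text.toList 0 text.toList [] (by simp [PySem.Str.len_eq]) (by simp)
  simpa using h
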